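-- pv_equiv track=rewrite | github.com/rogerrojur/nl2sql | code/token_utils.py | find_str_wvi_full_match
-- ===== SOURCE A (Python) =====
-- def find_str_wvi_full_match(s, l):
--     # from stack overflow.
--     # s 包括 l 中的一个连续的子序列
--     results = []
--     s_len, l_len = len(s), len(l)
--
--     if not results:
--         for ix, token in enumerate(l):
--             if len(token) == 0:
--                 continue
--             if s[0] == token[0]:
--                 tmp_str, tmp_idx = '', ix
--                 while len(tmp_str) < s_len and tmp_idx < l_len:
--                     tmp_str += l[tmp_idx]
--                     tmp_idx += 1
--                 if tmp_str == s:
--                     # 找到完全匹配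
--                     return [ix, tmp_idx-1]
--     return None
-- ===== SOURCE B (Python) =====
-- def find_str_wvi_full_match(s, l):
--     # Precompute the full concatenation T and the token-boundary offsets once;
--     # a match is s appearing as a slice of T that starts at a nonempty token's
--     # start offset and ends exactly at a token boundary (earliest such token).
--     n = len(s)
--     T = "".join(l)
--     offs = [0]
--     for t in l:
--         offs.append(offs[-1] + len(t))
--     ends = {}
--     for j in range(len(l)):
--         if offs[j + 1] not in ends:
--             ends[offs[j + 1]] = j
--     for ix, t in enumerate(l):
--         if not t:
--             continue
--         p = offs[ix]
--         if T[p:p + n] == s and (p + n) in ends: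
--             return [ix, ends[p + n]]
--     return None
-- ===== Notes on version B (the rewrite author's own statement) =====
-- stated objective: faster
-- what changed: B joins all tokens once and builds a boundary-offset index (prefix offsets plus a first-wins dict from end offset to token index), so A's per-candidate concatenate-tokens-and-compare inner while loop disappears: a match is s occurring as a slice of the joined string starting at a nonempty token's offset and ending exactly at a token boundary.
import Mathlib
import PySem

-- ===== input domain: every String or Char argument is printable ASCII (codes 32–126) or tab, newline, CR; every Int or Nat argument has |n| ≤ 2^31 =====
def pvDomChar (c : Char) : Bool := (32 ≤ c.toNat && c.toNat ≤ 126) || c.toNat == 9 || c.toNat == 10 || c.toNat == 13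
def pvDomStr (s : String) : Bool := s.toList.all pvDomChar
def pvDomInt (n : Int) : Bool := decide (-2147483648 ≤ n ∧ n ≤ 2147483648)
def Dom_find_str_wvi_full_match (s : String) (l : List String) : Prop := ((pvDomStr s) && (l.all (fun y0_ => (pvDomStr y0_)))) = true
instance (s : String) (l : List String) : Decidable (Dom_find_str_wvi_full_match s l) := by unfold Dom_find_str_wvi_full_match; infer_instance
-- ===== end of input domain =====

-- B replaces A's per-candidate concatenate-and-compare inner loop by a one-time global
-- concatenation with a boundary-offset index: a match is s occurring as a slice of the
-- joined string aligned to token boundaries (objective: faster; measured so by the check).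

-- ===== PORT A =====
-- inner while loop of A: tmp_str += l[tmp_idx]; tmp_idx += 1 while len(tmp_str) < s_len
-- and tmp_idx < l_len; `rest` is l[tmp_idx:], so `rest ≠ []` is `tmp_idx < l_len`.
def pvBuildA (n : Nat) : List Char → Nat → List (List Char) → List Char × Nat
  | tmp, idx, [] => (tmp, idx)
  | tmp, idx, t :: rest =>
    if tmp.length < n then pvBuildA n (tmp ++ t) (idx + 1) rest else (tmp, idx)

-- outer for loop of A over enumerate(l); `s[0] == token[0]` ported as head? equality
-- (exact whenever s ≠ "" and the token is nonempty; A raises IndexError on s = "").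
def pvLoopA (s : List Char) : Nat → List (List Char) → Option (List Int)
  | _, [] => none
  | ix, t :: rest =>
    if t.length = 0 then pvLoopA s (ix + 1) rest
    else if s.head? = t.head? then
      let r := pvBuildA s.length [] ix (t :: rest)
      if r.1 = s then some [(ix : Int), (r.2 : Int) - 1]
      else pvLoopA s (ix + 1) rest
    else pvLoopA s (ix + 1) rest

def find_str_wvi_full_match (s : String) (l : List String) : Option (List Int) :=
  pvLoopA s.toList 0 (l.map String.toList)

-- ===== PORT B =====
-- offs = [0]; for t in l: offs.append(offs[-1] + len(t))   (offs[-1] on a nonempty list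
-- is its last element: getLastD is exact here since the accumulator is never empty)
def pvOffs (L : List (List Char)) : List Nat :=
  L.foldl (fun offs t => offs ++ [offs.getLastD 0 + t.length]) [0]

-- ends = {}; for j in range(len(l)): if offs[j+1] not in ends: ends[offs[j+1]] = j
-- (offs[j+1] is always in range, so List.getD is exact)
def pvEnds (L : List (List Char)) (offs : List Nat) : PySem.Dict Nat Nat :=
  (List.range L.length).foldl
    (fun d j => if d.contains (offs.getD (j + 1) 0) then d else d.insert (offs.getD (j + 1) 0) j)
    PySem.Dict.empty

-- outer for loop of B; T[p:p+n] with 0 ≤ p and n = len(s) ≥ 0 is (T.drop p).take n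
def pvLoopB (s T : List Char) (offs : List Nat) (ends : PySem.Dict Nat Nat) :
    Nat → List (List Char) → Option (List Int)
  | _, [] => none
  | ix, t :: rest =>
    if t = [] then pvLoopB s T offs ends (ix + 1) rest
    else
      let p := offs.getD ix 0
      if (T.drop p).take s.length = s ∧ ends.contains (p + s.length) then
        some [(ix : Int), ((ends.getD (p + s.length) 0 : Nat) : Int)]
      else pvLoopB s T offs ends (ix + 1) rest

def find_str_wvi_full_match_alt (s : String) (l : List String) : Option (List Int) :=
  let L := l.map String.toList
  pvLoopB s.toList L.flatten (pvOffs L) (pvEnds L (pvOffs L)) 0 L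

-- ===== PRECONDITION & SPEC =====
-- Pre_ excludes exactly the inputs where A raises IndexError at s[0]: empty s together
-- with at least one nonempty token.
def Pre_find_str_wvi_full_match (s : String) (l : List String) : Prop :=
  s ≠ "" ∨ ∀ t ∈ l, t = ""
instance (s : String) (l : List String) : Decidable (Pre_find_str_wvi_full_match s l) := by
  unfold Pre_find_str_wvi_full_match; infer_instance

def pvWitness_find_str_wvi_full_match : String × List String := ("ab", ["a", "b"])

def Spec_find_str_wvi_full_match (s : String) (l : List String) (out : Option (List Int)) : Prop := out = find_str_wvi_full_match_alt s l
instance (s : String) (l : List String) (out : Option (List Int)) : Decidable (Spec_find_str_wvi_full_match s l out) := by unfold Spec_find_str_wvi_full_match; infer_instance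

-- ===== CLAIM (what is proved, stated in full; the proofs are below) =====
def Claim_equal_find_str_wvi_full_match : Prop := ∀ (s : String) (l : List String), Dom_find_str_wvi_full_match s l → Pre_find_str_wvi_full_match s l → Spec_find_str_wvi_full_match s l (find_str_wvi_full_match s l)

-- ===== LEMMAS AND PROOFS =====

-- boundary offset after k tokens (proof-side name for offs[k])
def pvOff (L : List (List Char)) (k : Nat) : Nat := ((L.take k).map List.length).sum

-- the tail of the offsets list, as a structural recursion
def pvPsums (m : Nat) : List (List Char) → List Nat
  | [] => []
  | t :: r => (m + t.length) :: pvPsums (m + t.length) r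

-- a nonempty prefix fixes the head
theorem pv_head_of_prefix {t s : List Char} (ht : t ≠ []) (h : t <+: s) :
    s.head? = t.head? := by
  obtain ⟨u, hu⟩ := h
  cases t with
  | nil => exact absurd rfl ht
  | cons c cs => simp [← hu]

theorem pvOffs_foldl : ∀ (L : List (List Char)) (acc : List Nat) (v : Nat),
    L.foldl (fun offs t => offs ++ [offs.getLastD 0 + t.length]) (acc ++ [v])
      = (acc ++ [v]) ++ pvPsums v L := by
  intro L
  induction L with
  | nil => intro acc v; simp [pvPsums]
  | cons t r ih =>
    intro acc v
    simp only [List.foldl_cons]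
    have hlast : (acc ++ [v]).getLastD 0 = v := by simp
    rw [hlast]
    have := ih (acc ++ [v]) (v + t.length)
    simp only [List.append_assoc] at this ⊢
    rw [this]
    simp [pvPsums]

theorem pvOffs_eq (L : List (List Char)) : pvOffs L = 0 :: pvPsums 0 L := by
  have := pvOffs_foldl L [] 0
  simpa [pvOffs] using this

theorem pvPsums_getElem? : ∀ (L : List (List Char)) (m k : Nat), k < L.length →
    (pvPsums m L)[k]? = some (m + ((L.take (k + 1)).map List.length).sum) := by
  intro L
  induction L with
  | nil => intro m k h; simp at h
  | cons t r ih =>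
    intro m k h
    cases k with
    | zero => simp [pvPsums]
    | succ k =>
      simp only [pvPsums, List.getElem?_cons_succ]
      rw [ih (m + t.length) k (by simpa using h)]
      simp [List.take_succ_cons, Nat.add_assoc]

theorem pvOffs_getD (L : List (List Char)) (k : Nat) (h : k ≤ L.length) :
    (pvOffs L).getD k 0 = pvOff L k := by
  rw [pvOffs_eq]
  cases k with
  | zero => simp [pvOff]
  | succ k =>
    have hk : k < L.length := h
    rw [List.getD_eq_getElem?_getD]
    simp only [List.getElem?_cons_succ]
    rw [pvPsums_getElem? L 0 k hk]
    simp [pvOff]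

theorem pvOff_mono (L : List (List Char)) {a b : Nat} (h : a ≤ b) : pvOff L a ≤ pvOff L b := by
  unfold pvOff
  have hb : b = a + (b - a) := by omega
  rw [hb, List.take_add, List.map_append, List.sum_append]
  exact Nat.le_add_right _ _

theorem pvOff_add (L : List (List Char)) (ix m : Nat) :
    pvOff L (ix + m) = pvOff L ix + (((L.drop ix).take m).map List.length).sum := by
  unfold pvOff
  rw [List.take_add, List.map_append, List.sum_append]

theorem pvFlatten_drop (L : List (List Char)) (ix : Nat) :
    L.flatten.drop (pvOff L ix) = (L.drop ix).flatten := by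
  conv_lhs => rw [← List.take_append_drop ix L]
  rw [List.flatten_append]
  rw [List.drop_left' (by simp [pvOff])]

theorem pvBuildA_shape (n : Nat) : ∀ (chunks : List (List Char)) (acc : List Char) (idx : Nat),
    ∃ m ≤ chunks.length, pvBuildA n acc idx chunks = (acc ++ (chunks.take m).flatten, idx + m) := by
  intro chunks
  induction chunks with
  | nil => intro acc idx; exact ⟨0, by simp, by simp [pvBuildA]⟩
  | cons t rest ih =>
    intro acc idx
    simp only [pvBuildA]
    by_cases hlt : acc.length < n
    · obtain ⟨m, hm, he⟩ := ih (acc ++ t) (idx + 1)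
      refine ⟨m + 1, by simpa using hm, ?_⟩
      rw [if_pos hlt, he]
      simp [List.take_succ_cons, Nat.add_assoc, Nat.add_comm 1 m]
    · exact ⟨0, by simp, by rw [if_neg hlt]; simp⟩

theorem pvBuildA_min (s : List Char) : ∀ (chunks : List (List Char)) (acc : List Char) (idx m : Nat),
    m ≤ chunks.length → acc ++ (chunks.take m).flatten = s →
    (∀ k < m, acc ++ (chunks.take k).flatten ≠ s) →
    pvBuildA s.length acc idx chunks = (s, idx + m) := by
  intro chunks
  induction chunks with
  | nil =>
    intro acc idx m hm heq _
    have hm0 : m = 0 := by simpa using hm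
    subst hm0
    simp only [List.take_nil, List.flatten_nil, List.append_nil] at heq
    simp [pvBuildA, heq]
  | cons t rest ih =>
    intro acc idx m hm heq hmin
    cases m with
    | zero =>
      simp only [List.take_zero, List.flatten_nil, List.append_nil] at heq
      simp [pvBuildA, heq]
    | succ m' =>
      have hne : acc ≠ s := by
        have := hmin 0 (Nat.succ_pos m')
        simpa using this
      have hpre : acc <+: s := by
        refine ⟨(( (t :: rest).take (m' + 1)).flatten), heq⟩
      have hlt : acc.length < s.length := by
        rcases Nat.lt_or_ge acc.length s.length with h | h
        · exact h
        · exact absurd (hpre.eq_of_length (Nat.le_antisymm hpre.length_le h)) hne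
      simp only [pvBuildA]
      rw [if_pos hlt]
      have heq' : (acc ++ t) ++ (rest.take m').flatten = s := by
        simpa [List.take_succ_cons, List.append_assoc] using heq
      have hmin' : ∀ k < m', (acc ++ t) ++ (rest.take k).flatten ≠ s := by
        intro k hk
        have := hmin (k + 1) (by omega)
        simpa [List.take_succ_cons, List.append_assoc] using this
      have := ih (acc ++ t) (idx + 1) m' (by simpa using hm) heq' hmin'
      rw [this]
      simp [Nat.add_assoc, Nat.add_comm 1 m']

theorem pvSetdefaultFold_get? : ∀ (ps : List (Nat × Nat)) (d : PySem.Dict Nat Nat) (k : Nat),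
    (ps.foldl (fun d p => if d.contains p.1 then d else d.insert p.1 p.2) d).get? k
      = (d.get? k).or (((ps.find? (fun p => p.1 == k)).map (·.2))) := by
  intro ps
  induction ps with
  | nil => intro d k; simp
  | cons p ps ih =>
    intro d k
    simp only [List.foldl_cons]
    by_cases hc : d.contains p.1
    · rw [if_pos hc, ih]
      by_cases hk : p.1 = k
      · subst hk
        have hsome : (d.get? p.1).isSome := by
          rw [← PySem.Dict.contains_eq_isSome_get?]; exact hc
        obtain ⟨v, hv⟩ := Option.isSome_iff_exists.mp hsome
        simp [hv]
      · simp [hk]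
    · rw [if_neg hc]
      rw [ih]
      have hnone : d.get? p.1 = none := by
        rcases h : d.get? p.1 with _ | v
        · rfl
        · exfalso
          apply hc
          rw [PySem.Dict.contains_eq_isSome_get?, h]; rfl
      rw [PySem.Dict.get?_insert]
      by_cases hk : p.1 = k
      · subst hk
        rw [if_pos rfl, hnone]
        simp
      · rw [if_neg (Ne.symm hk)]
        simp [hk]

theorem pvEnds_get? (L : List (List Char)) (e : Nat) :
    (pvEnds L (pvOffs L)).get? e
      = (((List.range L.length).map (fun j => (pvOff L (j + 1), j))).find?
          (fun p => p.1 == e)).map (·.2) := by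
  unfold pvEnds
  have hcongr : (List.range L.length).foldl
      (fun d j => if d.contains ((pvOffs L).getD (j + 1) 0) then d
                  else d.insert ((pvOffs L).getD (j + 1) 0) j) PySem.Dict.empty
    = (List.range L.length).foldl
      (fun d j => if d.contains (pvOff L (j + 1)) then d else d.insert (pvOff L (j + 1)) j)
      PySem.Dict.empty := by
    apply PySem.List.foldl_congr_mem
    intro d j hj
    rw [pvOffs_getD L (j + 1) (by simpa using List.mem_range.mp hj)]
  rw [hcongr]
  have h2 := pvSetdefaultFold_get? ((List.range L.length).map (fun j => (pvOff L (j + 1), j)))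
    PySem.Dict.empty e
  simp only [List.foldl_map] at h2
  rw [h2]
  simp

theorem pvEnds_contains (L : List (List Char)) (e : Nat) :
    (pvEnds L (pvOffs L)).contains e = true ↔ ∃ j < L.length, pvOff L (j + 1) = e := by
  rw [PySem.Dict.contains_eq_isSome_get?, pvEnds_get?]
  simp only [Option.isSome_map]
  rw [List.find?_isSome]
  constructor
  · rintro ⟨p, hp, hpe⟩
    simp only [List.mem_map, List.mem_range] at hp
    obtain ⟨j, hj, rfl⟩ := hp
    exact ⟨j, hj, by simpa using hpe⟩
  · rintro ⟨j, hj, hje⟩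
    exact ⟨(pvOff L (j + 1), j), List.mem_map.mpr ⟨j, List.mem_range.mpr hj, rfl⟩, by simpa using hje⟩

theorem pvEnds_getD_min (L : List (List Char)) (e jA : Nat) (h1 : jA < L.length)
    (h2 : pvOff L (jA + 1) = e) (h3 : ∀ k < jA, pvOff L (k + 1) ≠ e) :
    (pvEnds L (pvOffs L)).getD e 0 = jA := by
  rw [PySem.Dict.getD_eq_get?_getD, pvEnds_get?]
  have hsplit : List.range L.length = List.range jA ++ (List.range (L.length - jA)).map (jA + ·) := by
    rw [← List.range_add]
    congr 1
    omega
  rw [hsplit, List.map_append, List.find?_append]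
  have hfst : (((List.range jA).map (fun j => (pvOff L (j + 1), j))).find?
      (fun p => p.1 == e)) = none := by
    rw [List.find?_eq_none]
    intro p hp
    simp only [List.mem_map, List.mem_range] at hp
    obtain ⟨j, hj, rfl⟩ := hp
    simpa using h3 j hj
  rw [hfst]
  obtain ⟨c, hc⟩ : ∃ c, L.length - jA = c + 1 := ⟨L.length - jA - 1, by omega⟩
  rw [hc, List.range_succ_eq_map]
  simp only [List.map_cons, List.map_map]
  simp [h2]

theorem pv_outer (s : List Char) (hs : s ≠ []) (L : List (List Char)) :
    ∀ (chunks : List (List Char)) (ix : Nat), L.drop ix = chunks →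
      pvLoopA s ix chunks = pvLoopB s L.flatten (pvOffs L) (pvEnds L (pvOffs L)) ix chunks := by
  intro chunks
  induction chunks with
  | nil => intro ix _; simp [pvLoopA, pvLoopB]
  | cons t rest ih =>
    intro ix hdrop
    have hix : ix < L.length := by
      by_contra hge
      rw [List.drop_eq_nil_of_le (by omega)] at hdrop
      exact absurd hdrop (by simp)
    have hrest : L.drop (ix + 1) = rest := by
      have := congrArg (List.drop 1) hdrop
      simpa [List.drop_drop, Nat.add_comm 1 ix] using this
    have hlen : (t :: rest).length = L.length - ix := by
      rw [← hdrop, List.length_drop]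
    have hn : 0 < s.length := List.length_pos_iff.mpr hs
    set n := s.length with hn_def
    set p := pvOff L ix with hp_def
    have hgetD : (pvOffs L).getD ix 0 = p := pvOffs_getD L ix (Nat.le_of_lt hix)
    have hTdrop : L.flatten.drop p = (t :: rest).flatten := by
      rw [hp_def, pvFlatten_drop, hdrop]
    -- the B-side condition, rephrased
    have hCiff : ((L.flatten.drop p).take n = s ∧ (pvEnds L (pvOffs L)).contains (p + n) = true)
        ↔ ∃ m ≤ (t :: rest).length, ((t :: rest).take m).flatten = s := by
      rw [hTdrop, pvEnds_contains]
      constructor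
      · rintro ⟨hslice, j, hj, hje⟩
        have hjge : ix ≤ j := by
          by_contra hlt
          have : pvOff L (j + 1) ≤ p := hp_def ▸ pvOff_mono L (by omega)
          omega
        refine ⟨j + 1 - ix, by omega, ?_⟩
        have hadd : pvOff L (ix + (j + 1 - ix)) = p + (((L.drop ix).take (j + 1 - ix)).map List.length).sum :=
          hp_def ▸ pvOff_add L ix (j + 1 - ix)
        rw [show ix + (j + 1 - ix) = j + 1 by omega, hje] at hadd
        have hlenm : (((t :: rest).take (j + 1 - ix)).map List.length).sum = n := by
          rw [← hdrop] at *; omega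
        -- flatten of the take is a prefix of flatten of chunks with length n
        have hsplit2 : (t :: rest).flatten
            = ((t :: rest).take (j + 1 - ix)).flatten ++ ((t :: rest).drop (j + 1 - ix)).flatten := by
          rw [← List.flatten_append, List.take_append_drop]
        have hlenf : (((t :: rest).take (j + 1 - ix)).flatten).length = n := by
          rw [List.length_flatten]; exact hlenm
        rw [hsplit2, List.take_left' hlenf] at hslice
        exact hslice
      · rintro ⟨m, hm, hflat⟩
        have hm1 : 1 ≤ m := by
          rcases Nat.eq_zero_or_pos m with rfl | h
          · rw [List.take_zero, List.flatten_nil] at hflat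
            exact absurd hflat (fun hh => hs hh.symm)
          · exact h
        have hlenm : (((t :: rest).take m).map List.length).sum = n := by
          have := congrArg List.length hflat
          rw [List.length_flatten] at this
          simpa using this
        have hadd : pvOff L (ix + m) = p + n := by
          have h4 := pvOff_add L ix m
          rw [hdrop, hlenm] at h4
          rw [h4, hp_def]
        constructor
        · have hsplit2 : (t :: rest).flatten
              = ((t :: rest).take m).flatten ++ ((t :: rest).drop m).flatten := by
            rw [← List.flatten_append, List.take_append_drop]
          have hlenf : (((t :: rest).take m).flatten).length = n := by
            rw [List.length_flatten]; exact hlenm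
          rw [hsplit2, List.take_left' hlenf, hflat]
        · refine ⟨ix + m - 1, by omega, ?_⟩
          rw [show ix + m - 1 + 1 = ix + m by omega]
          exact hadd
    by_cases htne : t = []
    · -- empty token: both skip
      subst htne
      simp only [pvLoopA, pvLoopB]
      rw [if_pos (show ([] : List Char).length = 0 from rfl), if_pos trivial]
      exact ih (ix + 1) hrest
    by_cases hC : (L.flatten.drop p).take n = s ∧ (pvEnds L (pvOffs L)).contains (p + n) = true
    · -- match: both return some
      obtain ⟨mE, hmEle, hmE⟩ := hCiff.mp hC
      have hEx : ∃ m, ((t :: rest).take m).flatten = s := ⟨mE, hmE⟩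
      classical
      have hm₀ : ((t :: rest).take (Nat.find hEx)).flatten = s := Nat.find_spec hEx
      have hm₀min : ∀ k < Nat.find hEx, ((t :: rest).take k).flatten ≠ s :=
        fun k hk => Nat.find_min hEx hk
      set m₀ := Nat.find hEx with hm₀_def
      have hm₀le : m₀ ≤ (t :: rest).length := le_trans (Nat.find_min' hEx hmE) hmEle
      have hm₀1 : 1 ≤ m₀ := by
        rcases Nat.eq_zero_or_pos m₀ with hz | h
        · rw [hz, List.take_zero, List.flatten_nil] at hm₀
          exact absurd hm₀ (fun hh => hs hh.symm)
        · exact h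
      -- heads agree
      have hpre : t <+: s := by
        obtain ⟨m', hm'⟩ : ∃ m', m₀ = m' + 1 := ⟨m₀ - 1, by omega⟩
        rw [hm'] at hm₀
        exact ⟨(rest.take m').flatten, by simpa [List.take_succ_cons] using hm₀⟩
      have hhead : s.head? = t.head? := pv_head_of_prefix htne hpre
      -- A's inner loop result
      have hbuild : pvBuildA s.length [] ix (t :: rest) = (s, ix + m₀) :=
        pvBuildA_min s (t :: rest) [] ix m₀ hm₀le (by simpa using hm₀)
          (by intro k hk; simpa using hm₀min k hk)
      -- the end-boundary offset identity for m₀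
      have hadd₀ : pvOff L (ix + m₀) = p + n := by
        have hlenm : (((t :: rest).take m₀).map List.length).sum = n := by
          have := congrArg List.length hm₀
          rw [List.length_flatten] at this
          simpa using this
        have h4 := pvOff_add L ix m₀
        rw [hdrop, hlenm] at h4
        rw [h4, hp_def]
      -- B's dict value is exactly A's end index
      have hgetDval : (pvEnds L (pvOffs L)).getD (p + n) 0 = ix + m₀ - 1 := by
        apply pvEnds_getD_min L (p + n) (ix + m₀ - 1) (by omega)
        · rw [show ix + m₀ - 1 + 1 = ix + m₀ by omega]; exact hadd₀
        · intro k hk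
          rcases Nat.lt_or_ge k ix with hki | hki
          · have : pvOff L (k + 1) ≤ p := hp_def ▸ pvOff_mono L (by omega)
            omega
          · intro he
            have hm' : k + 1 - ix < m₀ := by omega
            have h4 := pvOff_add L ix (k + 1 - ix)
            rw [hdrop] at h4
            rw [show ix + (k + 1 - ix) = k + 1 by omega] at h4
            have hlenm' : (((t :: rest).take (k + 1 - ix)).map List.length).sum = n := by
              rw [he] at h4; omega
            have hsplit2 : (t :: rest).flatten
                = ((t :: rest).take (k + 1 - ix)).flatten ++ ((t :: rest).drop (k + 1 - ix)).flatten := by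
              rw [← List.flatten_append, List.take_append_drop]
            have hlenf : (((t :: rest).take (k + 1 - ix)).flatten).length = n := by
              rw [List.length_flatten]; exact hlenm'
            have hslice := hC.1
            rw [hTdrop, hsplit2, List.take_left' hlenf] at hslice
            exact hm₀min (k + 1 - ix) hm' hslice
      -- evaluate both sides
      simp only [pvLoopA, pvLoopB]
      rw [if_neg (by simpa [List.length_eq_zero_iff] using htne), if_pos hhead, hbuild,
        if_neg htne, hgetD]
      rw [if_pos (show (s : List Char) = s from rfl)]
      rw [if_pos hC, hgetDval]
      have : ((ix + m₀ : Nat) : Int) - 1 = ((ix + m₀ - 1 : Nat) : Int) := by omega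
      rw [this]
    · -- no match at this token: both skip
      have hrec := ih (ix + 1) hrest
      simp only [pvLoopA, pvLoopB]
      rw [if_neg (by simpa [List.length_eq_zero_iff] using htne), if_neg htne, hgetD,
        if_neg hC]
      by_cases hhead : s.head? = t.head?
      · rw [if_pos hhead]
        have hne : (pvBuildA s.length [] ix (t :: rest)).1 ≠ s := by
          intro he
          obtain ⟨m, hm, hshape⟩ := pvBuildA_shape s.length (t :: rest) [] ix
          apply hC
          apply hCiff.mpr
          refine ⟨m, hm, ?_⟩
          rw [hshape] at he
          simpa using he
        rw [if_neg hne]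
        exact hrec
      · rw [if_neg hhead]
        exact hrec

theorem pv_all_empty (s T : List Char) (offs : List Nat) (ends : PySem.Dict Nat Nat) :
    ∀ (l : List (List Char)) (ix : Nat), (∀ t ∈ l, t = []) →
      pvLoopA s ix l = none ∧ pvLoopB s T offs ends ix l = none := by
  intro l
  induction l with
  | nil => intro ix _; simp [pvLoopA, pvLoopB]
  | cons t rest ih =>
    intro ix h
    have ht : t = [] := h t (by simp)
    have hrest := ih (ix + 1) (fun u hu => h u (List.mem_cons_of_mem _ hu))
    subst ht
    refine ⟨?_, ?_⟩
    · simp only [pvLoopA]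
      rw [if_pos (show ([] : List Char).length = 0 from rfl)]
      exact hrest.1
    · simp only [pvLoopB]
      rw [if_pos trivial]
      exact hrest.2

-- ===== VERDICT (by name: the statement is the Claim_ definition above) =====
theorem find_str_wvi_full_match_spec : Claim_equal_find_str_wvi_full_match := by
  intro s l _ hpre
  unfold Spec_find_str_wvi_full_match find_str_wvi_full_match find_str_wvi_full_match_alt
  rcases hpre with hs | hall
  · have hs' : s.toList ≠ [] := fun h => hs (String.toList_inj.mp (h.trans rfl))
    exact pv_outer s.toList hs' (l.map String.toList) (l.map String.toList) 0 rfl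
  · have h : ∀ t ∈ l.map String.toList, t = [] := by
      intro t ht
      simp only [List.mem_map] at ht
      obtain ⟨u, hu, rfl⟩ := ht
      rw [hall u hu]; rfl
    have := pv_all_empty s.toList ((l.map String.toList).flatten)
      (pvOffs (l.map String.toList))
      (pvEnds (l.map String.toList) (pvOffs (l.map String.toList)))
      (l.map String.toList) 0 h
    rw [this.1, this.2]
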